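-- pv_equiv track=rewrite | github.com/megacysia/pythoncysiowy | cs50P/Lecture3/problem set 3/plates.py | finding_numbers
-- ===== SOURCE A (Python) =====
-- def finding_numbers(s:str):
--     y = len(s)
--     for i in range(y-1):
--         first = s[i]
--         second = s[i+1]
--         if first.isnumeric() and not second.isnumeric():
--             return False
--     return True
-- ===== SOURCE B (Python) =====
-- def finding_numbers(s: str):
--     # The numeric characters must form a suffix: find the first numeric
--     # character, then every character from there on must be numeric.
--     for i, c in enumerate(s):
--         if c.isnumeric():
--             return all(ch.isnumeric() for ch in s[i:])
--     return True
-- ===== Notes on version B (the rewrite author's own statement) =====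
-- stated objective: simpler
-- what changed: Replaced the index-based adjacent-pair scan with a find-first-numeric-then-verify-suffix decomposition: locate the first numeric character, then check everything after it is numeric (suffix check via all()).
import Mathlib
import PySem

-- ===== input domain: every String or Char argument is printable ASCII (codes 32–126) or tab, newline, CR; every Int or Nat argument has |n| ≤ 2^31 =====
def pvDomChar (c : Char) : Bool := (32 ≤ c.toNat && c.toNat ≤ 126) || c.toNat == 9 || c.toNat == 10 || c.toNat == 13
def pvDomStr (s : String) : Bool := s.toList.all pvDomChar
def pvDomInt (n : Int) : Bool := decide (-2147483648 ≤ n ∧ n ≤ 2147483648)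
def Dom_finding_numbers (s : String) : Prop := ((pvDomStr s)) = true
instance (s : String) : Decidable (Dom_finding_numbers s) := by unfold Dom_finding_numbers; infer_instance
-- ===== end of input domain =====

-- B replaces A's index-based adjacent-pair scan by a simpler find-first-numeric-then-verify-suffix decomposition.
-- str.isnumeric() is ported as PySem.Chars.isdigit, exact on the ASCII domain Dom_finding_numbers.


-- ===== PORT A =====
-- the 'for i in range(y-1)' loop with its early 'return False'
def finding_numbers_loopA (cs : List Char) : List Int → Bool
  | [] => true
  | i :: rest =>
    -- indices produced by range(y-1) are always in range, so the defaults are never used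
    let first := (PySem.List.pyGet? cs i).getD ' '
    let second := (PySem.List.pyGet? cs (i + 1)).getD ' '
    if PySem.Chars.isdigit first && !(PySem.Chars.isdigit second) then false
    else finding_numbers_loopA cs rest

def finding_numbers (s : String) : Bool :=
  let cs := s.toList
  let y : Int := cs.length
  finding_numbers_loopA cs (PySem.List.pyRange 0 (y - 1) 1)

-- ===== PORT B =====
-- 'for i, c in enumerate(s): if c.isnumeric(): return all(... for ch in s[i:])' / 'return True'
def finding_numbers_altGo : List Char → Bool
  | [] => true
  | c :: rest =>
    if PySem.Chars.isdigit c then (c :: rest).all PySem.Chars.isdigit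
    else finding_numbers_altGo rest

def finding_numbers_alt (s : String) : Bool :=
  finding_numbers_altGo s.toList

-- ===== PRECONDITION & SPEC =====
def Spec_finding_numbers (s : String) (out : Bool) : Prop := out = finding_numbers_alt s
instance (s : String) (out : Bool) : Decidable (Spec_finding_numbers s out) := by unfold Spec_finding_numbers; infer_instance

-- ===== CLAIM (what is proved, stated in full; the proofs are below) =====
def Claim_equal_finding_numbers : Prop := ∀ (s : String), Dom_finding_numbers s → Spec_finding_numbers s (finding_numbers s)

-- ===== LEMMAS AND PROOFS =====

-- adjacent-pair characterisation of A's loop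
def pairOK : List Char → Bool
  | [] => true
  | [_] => true
  | a :: b :: rest =>
    if PySem.Chars.isdigit a && !(PySem.Chars.isdigit b) then false
    else pairOK (b :: rest)

lemma pyGet?_cons_add_one (a : Char) (cs : List Char) (i : Int) (h : 0 ≤ i) :
    PySem.List.pyGet? (a :: cs) (i + 1) = PySem.List.pyGet? cs i := by
  rw [PySem.List.pyGet?_of_nonneg _ (show (0:Int) ≤ i + 1 by omega),
      PySem.List.pyGet?_of_nonneg _ h]
  have : (i + 1).toNat = i.toNat + 1 := by omega
  simp [this]

lemma loopA_shift (a : Char) (cs : List Char) (r : List Int) (h : ∀ i ∈ r, 0 ≤ i) :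
    finding_numbers_loopA (a :: cs) (r.map (· + 1)) = finding_numbers_loopA cs r := by
  induction r with
  | nil => rfl
  | cons i rest ih =>
    have hi : 0 ≤ i := h i (by simp)
    simp only [List.map_cons, finding_numbers_loopA,
      pyGet?_cons_add_one a cs i hi, pyGet?_cons_add_one a cs (i + 1) (by omega)]
    split
    · rfl
    · exact ih (fun j hj => h j (by simp [hj]))

lemma shift_range (m : Int) :
    PySem.List.pyRange 1 (m + 1) 1 = (PySem.List.pyRange 0 m 1).map (· + 1) := by
  rw [PySem.List.pyRange_one, PySem.List.pyRange_one, List.map_map]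
  have : (m + 1 - 1).toNat = (m - 0).toNat := by omega
  rw [this]
  exact List.map_congr_left (fun k _ => by simp [Function.comp]; omega)

lemma A_eq_pairOK (cs : List Char) :
    finding_numbers_loopA cs (PySem.List.pyRange 0 ((cs.length : Int) - 1) 1) = pairOK cs := by
  induction cs with
  | nil => simp [PySem.List.pyRange_one_eq_nil, finding_numbers_loopA, pairOK]
  | cons a cs' ih =>
    cases cs' with
    | nil => simp [PySem.List.pyRange_one_eq_nil, finding_numbers_loopA, pairOK]
    | cons b rest =>
      have hlen : ((a :: b :: rest).length : Int) - 1 = ((b :: rest).length : Int) - 1 + 1 := by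
        simp only [List.length_cons]; push_cast; ring
      rw [hlen, PySem.List.pyRange_one_cons (by
        simp only [List.length_cons]; push_cast; omega)]
      simp only [finding_numbers_loopA, PySem.List.pyGet?_zero_cons,
        pyGet?_cons_add_one a (b :: rest) 0 le_rfl, Option.getD_some]
      rw [pairOK]
      split
      · rfl
      · rw [show ((0:Int) + 1) = 1 by norm_num, shift_range,
          loopA_shift a (b :: rest) _ (fun i hi => (PySem.List.mem_pyRange_one.mp hi).1)]
        exact ih

lemma altGo_cons_digit (b : Char) (rest : List Char) (hb : PySem.Chars.isdigit b = true) :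
    finding_numbers_altGo (b :: rest) = (b :: rest).all PySem.Chars.isdigit := by
  simp [finding_numbers_altGo, hb]

lemma pairOK_eq_altGo (cs : List Char) : pairOK cs = finding_numbers_altGo cs := by
  induction cs with
  | nil => rfl
  | cons a cs' ih =>
    cases cs' with
    | nil => simp [pairOK, finding_numbers_altGo]
    | cons b rest =>
      by_cases ha : PySem.Chars.isdigit a = true
      · by_cases hb : PySem.Chars.isdigit b = true
        · rw [pairOK, if_neg (by simp [hb]), ih, altGo_cons_digit b rest hb]
          conv_rhs => rw [finding_numbers_altGo]
          rw [if_pos ha]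
          simp [List.all_cons, ha]
        · rw [pairOK, if_pos (by simp [ha, hb]), finding_numbers_altGo, if_pos ha]
          simp [List.all_cons, hb, ha]
      · rw [pairOK, if_neg (by simp [ha]), ih]
        conv_rhs => rw [finding_numbers_altGo]
        rw [if_neg ha]

-- ===== VERDICT (by name: the statement is the Claim_ definition above) =====
theorem finding_numbers_spec : Claim_equal_finding_numbers := by
  intro s _
  unfold Spec_finding_numbers finding_numbers finding_numbers_alt
  simp only
  rw [A_eq_pairOK, pairOK_eq_altGo]
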